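-- pv_equiv track=rewrite | github.com/mateuszgrzyb-pl/searchless-chess | src/data_processing.py | allowed_pieces_only
-- ===== SOURCE A (Python) =====
-- def allowed_pieces_only(fen: str, allowed_pieces: str) -> bool:
--     """Checks if only allowed pieces are present in the given FEN string.
--
--     Args:
--         fen: FEN notation string (full format). Only the piece placement section
--             (first field before space) is validated.
--         allowed_pieces: String containing allowed piece symbols. Case-insensitive.
--
--     Returns:
--         True if all letters in the FEN placement section belong to the set of
--         allowed symbols; False otherwise.
--     """
--     placement = fen.partition(' ')[0]
--     allowed = set(allowed_pieces.lower()) | {'k'}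
--     contains = allowed.__contains__
--     for ch in placement:
--         if ch.isalpha() and not contains(ch.lower()):
--             return False
--     return True
-- ===== SOURCE B (Python) =====
-- def allowed_pieces_only(fen: str, allowed_pieces: str) -> bool:
--     """Inverted traversal: instead of scanning the placement per character,
--     iterate over the fixed 26-letter alphabet and require every letter that is
--     NOT allowed (and is not a king) to be absent, in either case, from the
--     placement field. Uses only substring membership, no sets."""
--     placement = fen.partition(' ')[0]
--     allowed = allowed_pieces.lower()
--     for letter in 'abcdefghijklmnopqrstuvwxyz':
--         if letter in allowed or letter == 'k':
--             continue
--         if letter in placement or letter.upper() in placement: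
--             return False
--     return True
-- ===== Notes on version B (the rewrite author's own statement) =====
-- stated objective: alternative
-- what changed: Inverted the traversal: instead of streaming over the placement characters with an allowed-set membership test, B iterates over the fixed 26-letter alphabet and checks each disallowed letter is absent (in either case) from the placement using substring membership, with no set at all.
import Mathlib
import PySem

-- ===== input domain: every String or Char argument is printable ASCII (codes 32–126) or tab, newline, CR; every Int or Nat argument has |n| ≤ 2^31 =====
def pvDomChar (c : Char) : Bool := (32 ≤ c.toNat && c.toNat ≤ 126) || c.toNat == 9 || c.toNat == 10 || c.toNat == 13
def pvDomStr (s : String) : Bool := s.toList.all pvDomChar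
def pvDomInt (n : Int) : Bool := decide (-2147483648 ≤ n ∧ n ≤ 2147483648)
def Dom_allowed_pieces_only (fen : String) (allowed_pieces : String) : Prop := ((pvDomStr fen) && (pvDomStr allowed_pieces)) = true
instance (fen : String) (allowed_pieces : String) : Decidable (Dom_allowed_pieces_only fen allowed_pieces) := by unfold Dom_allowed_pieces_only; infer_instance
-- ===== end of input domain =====

-- B inverts the traversal: it iterates over the fixed 26-letter alphabet and checks each
-- disallowed letter is absent (in either case) from the placement, using no set (objective: alternative).


-- ===== PORT A =====
-- A's for-loop over the placement with early 'return False'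
def apoLoopA (allowed : PySem.Set Char) : List Char → Bool
  | [] => true
  | c :: rest =>
      if PySem.Chars.isalpha c && !(PySem.Set.contains allowed (PySem.Chars.lowerChar c))
      then false
      else apoLoopA allowed rest

def allowed_pieces_only (fen : String) (allowed_pieces : String) : Bool :=
  -- fen.partition(' ')[0] = the prefix before the first space (hand port, exact)
  let placement := fen.toList.takeWhile (fun c => c ≠ ' ')
  let allowed := PySem.Set.union (PySem.Set.ofList (PySem.Chars.lower allowed_pieces.toList)) ['k']
  apoLoopA allowed placement

-- ===== PORT B =====
-- the literal 'abcdefghijklmnopqrstuvwxyz' Source B iterates over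
def apoAlphabet : List Char := ['a','b','c','d','e','f','g','h','i','j','k','l','m','n','o','p','q','r','s','t','u','v','w','x','y','z']

-- B's for-loop over the alphabet with 'continue' and early 'return False'
def apoLoopB (allowedLower placement : List Char) : List Char → Bool
  | [] => true
  | letter :: rest =>
      if allowedLower.contains letter || letter == 'k' then
        apoLoopB allowedLower placement rest
      else if placement.contains letter || placement.contains (PySem.Chars.upperChar letter) then
        false
      else
        apoLoopB allowedLower placement rest

def allowed_pieces_only_alt (fen : String) (allowed_pieces : String) : Bool :=
  let placement := fen.toList.takeWhile (fun c => c ≠ ' ')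
  let allowedLower := PySem.Chars.lower allowed_pieces.toList
  apoLoopB allowedLower placement apoAlphabet

-- ===== PRECONDITION & SPEC =====
def Spec_allowed_pieces_only (fen : String) (allowed_pieces : String) (out : Bool) : Prop := out = allowed_pieces_only_alt fen allowed_pieces
instance (fen : String) (allowed_pieces : String) (out : Bool) : Decidable (Spec_allowed_pieces_only fen allowed_pieces out) := by unfold Spec_allowed_pieces_only; infer_instance

-- ===== CLAIM =====
def Claim_equal_allowed_pieces_only : Prop := ∀ (fen : String) (allowed_pieces : String), Dom_allowed_pieces_only fen allowed_pieces → Spec_allowed_pieces_only fen allowed_pieces (allowed_pieces_only fen allowed_pieces)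

-- ===== LEMMAS AND PROOFS =====

-- uppercase alphabet, used only in the proofs
def apoUpper : List Char := ['A','B','C','D','E','F','G','H','I','J','K','L','M','N','O','P','Q','R','S','T','U','V','W','X','Y','Z']

lemma apoLoopA_iff (allowed : PySem.Set Char) (l : List Char) :
    apoLoopA allowed l = true ↔
      ∀ c ∈ l, PySem.Chars.isalpha c = true → PySem.Chars.lowerChar c ∈ allowed := by
  induction l with
  | nil => simp [apoLoopA]
  | cons c rest ih =>
      by_cases h : (PySem.Chars.isalpha c && !(PySem.Set.contains allowed (PySem.Chars.lowerChar c))) = true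
      · simp only [Bool.and_eq_true, Bool.not_eq_true'] at h
        have hnm : PySem.Chars.lowerChar c ∉ allowed := by
          intro hm
          rw [← PySem.Set.contains_iff, h.2] at hm
          exact Bool.false_ne_true hm
        simp [apoLoopA, h.1, hnm]
      · have h' : PySem.Chars.isalpha c = true → PySem.Chars.lowerChar c ∈ allowed := by
          intro ha
          rw [← PySem.Set.contains_iff]
          simpa [ha] using h
        simp only [apoLoopA, if_neg h, ih, List.forall_mem_cons]
        tauto

lemma apoLoopB_iff (al pl : List Char) (L : List Char) :
    apoLoopB al pl L = true ↔
      ∀ x ∈ L, ¬(x ∈ al ∨ x = 'k') → (x ∉ pl ∧ PySem.Chars.upperChar x ∉ pl) := by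
  induction L with
  | nil => simp [apoLoopB]
  | cons x rest ih =>
      by_cases hok : (al.contains x || x == 'k') = true
      · have hx : x ∈ al ∨ x = 'k' := by
          simpa [List.contains_eq_mem] using hok
        simp only [apoLoopB, if_pos hok, ih, List.forall_mem_cons]
        constructor
        · intro h
          exact ⟨fun hb => absurd hx hb, h⟩
        · intro h x' hx'
          exact h.2 x' hx'
      · have hx : ¬(x ∈ al ∨ x = 'k') := by
          simpa [List.contains_eq_mem] using hok
        by_cases hmem : (pl.contains x || pl.contains (PySem.Chars.upperChar x)) = true
        · have : x ∈ pl ∨ PySem.Chars.upperChar x ∈ pl := by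
            simpa [List.contains_eq_mem] using hmem
          simp only [apoLoopB, if_neg hok, if_pos hmem]
          constructor
          · intro hf; exact absurd hf Bool.false_ne_true
          · intro h
            rcases this with h1 | h1
            · exact absurd h1 (h x (List.mem_cons_self) hx).1
            · exact absurd h1 (h x (List.mem_cons_self) hx).2
        · have hnm : x ∉ pl ∧ PySem.Chars.upperChar x ∉ pl := by
            constructor <;> (intro hmm; apply hmem; simp [List.contains_eq_mem, hmm])
          simp only [apoLoopB, if_neg hok, if_neg hmem, ih, List.forall_mem_cons]
          constructor
          · intro h
            exact ⟨fun _ => hnm, h⟩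
          · intro h
            exact h.2

-- per-letter facts over the two literal alphabets (26 cases each, checked by decide)
lemma apoLowFacts : ∀ L ∈ apoAlphabet,
    PySem.Chars.isalpha L = true ∧ PySem.Chars.lowerChar L = L ∧
    PySem.Chars.isalpha (PySem.Chars.upperChar L) = true ∧
    PySem.Chars.lowerChar (PySem.Chars.upperChar L) = L := by
  have h : apoAlphabet.all (fun L =>
      PySem.Chars.isalpha L && (PySem.Chars.lowerChar L == L) &&
      PySem.Chars.isalpha (PySem.Chars.upperChar L) &&
      (PySem.Chars.lowerChar (PySem.Chars.upperChar L) == L)) = true := by decide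
  intro L hL
  have := List.all_eq_true.mp h L hL
  simp only [Bool.and_eq_true, beq_iff_eq] at this
  exact ⟨this.1.1.1, this.1.1.2, this.1.2, this.2⟩

lemma apoUpFacts : ∀ U ∈ apoUpper,
    PySem.Chars.lowerChar U ∈ apoAlphabet ∧
    PySem.Chars.upperChar (PySem.Chars.lowerChar U) = U := by
  have h : apoUpper.all (fun U =>
      apoAlphabet.contains (PySem.Chars.lowerChar U) &&
      (PySem.Chars.upperChar (PySem.Chars.lowerChar U) == U)) = true := by decide
  intro U hU
  have := List.all_eq_true.mp h U hU
  simp only [Bool.and_eq_true, beq_iff_eq, List.contains_eq_mem] at this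
  exact ⟨by simpa using this.1, this.2⟩

lemma apoMemLow (c : Char) (h : PySem.Chars.islower c = true) : c ∈ apoAlphabet := by
  simp only [PySem.Chars.islower, Bool.and_eq_true, decide_eq_true_eq] at h
  obtain ⟨h1, h2⟩ := h
  have hn1 : 97 ≤ c.toNat := Char.le_def.mp h1
  have hn2 : c.toNat ≤ 122 := Char.le_def.mp h2
  have hc : c = Char.ofNat c.toNat := (Char.ofNat_toNat c).symm
  rw [hc]
  interval_cases h : c.toNat <;> decide

lemma apoMemUp (c : Char) (h : PySem.Chars.isupper c = true) : c ∈ apoUpper := by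
  simp only [PySem.Chars.isupper, Bool.and_eq_true, decide_eq_true_eq] at h
  obtain ⟨h1, h2⟩ := h
  have hn1 : 65 ≤ c.toNat := Char.le_def.mp h1
  have hn2 : c.toNat ≤ 90 := Char.le_def.mp h2
  have hc : c = Char.ofNat c.toNat := (Char.ofNat_toNat c).symm
  rw [hc]
  interval_cases h : c.toNat <;> decide

lemma apoAllowedMem (al : List Char) (x : Char) :
    x ∈ PySem.Set.union (PySem.Set.ofList al) ['k'] ↔ x ∈ al ∨ x = 'k' := by
  rw [PySem.Set.mem_union, PySem.Set.mem_ofList]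
  simp

-- the heart: A's per-character condition equals B's per-letter condition
lemma apoMain (al pl : List Char) :
    (∀ c ∈ pl, PySem.Chars.isalpha c = true →
        PySem.Chars.lowerChar c ∈ PySem.Set.union (PySem.Set.ofList al) ['k']) ↔
      (∀ x ∈ apoAlphabet, ¬(x ∈ al ∨ x = 'k') → (x ∉ pl ∧ PySem.Chars.upperChar x ∉ pl)) := by
  constructor
  · intro hA x hx hbad
    obtain ⟨hxa, hxl, hua, hul⟩ := apoLowFacts x hx
    constructor
    · intro hmem
      exact hbad ((apoAllowedMem al x).mp (hxl ▸ hA x hmem hxa))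
    · intro hmem
      exact hbad ((apoAllowedMem al x).mp (hul ▸ hA _ hmem hua))
  · intro hB c hc ha
    rw [apoAllowedMem]
    by_contra hbad
    simp only [PySem.Chars.isalpha, Bool.or_eq_true] at ha
    rcases ha with hu | hl
    · -- c is uppercase: apply B at its lowercase form
      obtain ⟨hmem, hupl⟩ := apoUpFacts c (apoMemUp c hu)
      have hlow : PySem.Chars.lowerChar c ∈ apoAlphabet := hmem
      have := (hB _ hlow hbad).2
      rw [hupl] at this
      exact this hc
    · -- c is lowercase: lowerChar c = c
      have hmem : c ∈ apoAlphabet := apoMemLow c hl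
      obtain ⟨_, hxl, _, _⟩ := apoLowFacts c hmem
      have hbad' : ¬(c ∈ al ∨ c = 'k') := by rwa [hxl] at hbad
      exact (hB c hmem hbad').1 hc

-- ===== VERDICT =====
theorem allowed_pieces_only_spec : Claim_equal_allowed_pieces_only := by
  intro fen allowed_pieces _
  unfold Spec_allowed_pieces_only allowed_pieces_only allowed_pieces_only_alt
  rw [Bool.eq_iff_iff, apoLoopA_iff, apoLoopB_iff, apoMain]
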